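-- pv_equiv track=rewrite | github.com/itsmeboris/ai-agent-ecosystem | install-agents.py | convert_mdc_to_claude_format
-- ===== SOURCE A (Python) =====
-- def convert_mdc_to_claude_format(content: str) -> str:
--     """Convert .mdc format to Claude Desktop .md format."""
--     lines = content.split('\n')
--     result_lines = []
--     in_frontmatter = False
--     frontmatter_ended = False
--
--     for line in lines:
--         if line.strip() == '---' and not frontmatter_ended:
--             if not in_frontmatter:
--                 in_frontmatter = True
--                 result_lines.append(line)
--             else:
--                 # End of frontmatter - add model field before closing
--                 result_lines.append('model: sonnet')
--                 result_lines.append(line)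
--                 frontmatter_ended = True
--         elif in_frontmatter and not frontmatter_ended:
--             # Skip globs and alwaysApply fields
--             if not line.strip().startswith(('globs:', 'alwaysApply:')):
--                 result_lines.append(line)
--         else:
--             result_lines.append(line)
--
--     return '\n'.join(result_lines)
-- ===== SOURCE B (Python) =====
-- def _split_after_delim(lines):
--     """Split at the first '---' line, delimiter going with the prefix; None if absent."""
--     for i, line in enumerate(lines):
--         if line.strip() == '---':
--             return lines[:i + 1], lines[i + 1:]
--     return None
--
--
-- def _split_before_delim(lines):
--     """Split at the first '---' line, delimiter going with the suffix; None if absent."""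
--     for i, line in enumerate(lines):
--         if line.strip() == '---':
--             return lines[:i], lines[i:]
--     return None
--
--
-- def convert_mdc_to_claude_format(content: str) -> str:
--     """Convert .mdc format to Claude Desktop .md format."""
--     lines = content.split('\n')
--     found = _split_after_delim(lines)
--     if found is None:
--         return '\n'.join(lines)
--     head, body = found
--     keep = lambda l: not l.strip().startswith(('globs:', 'alwaysApply:'))
--     closed = _split_before_delim(body)
--     if closed is None:
--         return '\n'.join(head + [l for l in body if keep(l)])
--     interior, tail = closed
--     return '\n'.join(head + [l for l in interior if keep(l)] + ['model: sonnet'] + tail)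
-- ===== Notes on version B (the rewrite author's own statement) =====
-- stated objective: simpler
-- what changed: Replaces A's single stateful scan with two boolean flags by a split-based decomposition: cut the line list at the opening and closing frontmatter delimiters, filter only the interior lines, and assemble head, filtered interior, the added model field and the untouched tail.
import Mathlib
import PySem

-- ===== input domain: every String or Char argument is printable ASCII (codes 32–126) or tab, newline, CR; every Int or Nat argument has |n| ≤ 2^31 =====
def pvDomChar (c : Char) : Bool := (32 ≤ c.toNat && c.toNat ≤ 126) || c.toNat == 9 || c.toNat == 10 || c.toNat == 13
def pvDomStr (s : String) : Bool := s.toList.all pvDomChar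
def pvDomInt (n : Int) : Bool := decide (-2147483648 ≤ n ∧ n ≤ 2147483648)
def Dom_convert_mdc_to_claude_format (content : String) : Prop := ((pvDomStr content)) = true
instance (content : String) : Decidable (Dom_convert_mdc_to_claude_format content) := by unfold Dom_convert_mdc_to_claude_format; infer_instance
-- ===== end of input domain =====

-- B replaces A's flag-driven scan by splitting the lines at the two '---' delimiters;
-- objective: simpler (a plainer decomposition of the same O(n) work).

-- ===== PORT A =====
-- state: (result_lines, in_frontmatter, frontmatter_ended)
def pvAStep : List String × Bool × Bool → String → List String × Bool × Bool
  | (res, infm, ended), line =>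
    if (PySem.Str.strip line == "---") && !ended then
      if !infm then (res ++ [line], true, ended)
      else (res ++ ["model: sonnet", line], infm, true)
    else if infm && !ended then
      if !(PySem.Str.startswith (PySem.Str.strip line) "globs:"
            || PySem.Str.startswith (PySem.Str.strip line) "alwaysApply:") then
        (res ++ [line], infm, ended)
      else (res, infm, ended)
    else (res ++ [line], infm, ended)

def convert_mdc_to_claude_format (content : String) : String :=
  PySem.Str.join "\n"
    ((((PySem.Str.split? content "\n").getD []).foldl pvAStep ([], false, false)).1)

-- ===== PORT B =====
def pvIsDelim (l : String) : Bool := PySem.Str.strip l == "---"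

def pvKeep (l : String) : Bool :=
  !(PySem.Str.startswith (PySem.Str.strip l) "globs:"
      || PySem.Str.startswith (PySem.Str.strip l) "alwaysApply:")

-- _split_after_delim: first '---' goes with the prefix
def pvSplitAfterDelim : List String → Option (List String × List String)
  | [] => none
  | l :: ls =>
    if pvIsDelim l then some ([l], ls)
    else match pvSplitAfterDelim ls with
      | none => none
      | some (h, t) => some (l :: h, t)

-- _split_before_delim: first '---' goes with the suffix
def pvSplitBeforeDelim : List String → Option (List String × List String)
  | [] => none
  | l :: ls =>
    if pvIsDelim l then some ([], l :: ls)
    else match pvSplitBeforeDelim ls with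
      | none => none
      | some (h, t) => some (l :: h, t)

def convert_mdc_to_claude_format_alt (content : String) : String :=
  match pvSplitAfterDelim ((PySem.Str.split? content "\n").getD []) with
  | none => PySem.Str.join "\n" ((PySem.Str.split? content "\n").getD [])
  | some (head, body) =>
    match pvSplitBeforeDelim body with
    | none => PySem.Str.join "\n" (head ++ body.filter pvKeep)
    | some (interior, tail) =>
      PySem.Str.join "\n" (head ++ interior.filter pvKeep ++ ["model: sonnet"] ++ tail)

-- ===== PRECONDITION & SPEC =====
def Spec_convert_mdc_to_claude_format (content : String) (out : String) : Prop := out = convert_mdc_to_claude_format_alt content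
instance (content : String) (out : String) : Decidable (Spec_convert_mdc_to_claude_format content out) := by unfold Spec_convert_mdc_to_claude_format; infer_instance

-- ===== CLAIM (what is proved, stated in full; the proofs are below) =====
def Claim_equal_convert_mdc_to_claude_format : Prop := ∀ (content : String), Dom_convert_mdc_to_claude_format content → Spec_convert_mdc_to_claude_format content (convert_mdc_to_claude_format content)

-- ===== LEMMAS AND PROOFS =====

-- once the frontmatter has ended, A appends every remaining line verbatim
theorem pvFold_ended (ls : List String) (res : List String) (infm : Bool) :
    (ls.foldl pvAStep (res, infm, true)).1 = res ++ ls := by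
  induction ls generalizing res infm with
  | nil => simp
  | cons l ls ih =>
    have hstep : pvAStep (res, infm, true) l = (res ++ [l], infm, true) := by
      simp [pvAStep]
    rw [List.foldl_cons, hstep, ih]
    simp

-- inside the frontmatter, A filters until the closing delimiter (if any)
theorem pvFold_inside (ls : List String) (res : List String) :
    (ls.foldl pvAStep (res, true, false)).1 =
      match pvSplitBeforeDelim ls with
      | none => res ++ ls.filter pvKeep
      | some (h, t) => res ++ h.filter pvKeep ++ ["model: sonnet"] ++ t := by
  induction ls generalizing res with
  | nil => simp [pvSplitBeforeDelim]
  | cons l ls ih =>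
    by_cases hd : pvIsDelim l
    · have hd' : (PySem.Str.strip l == "---") = true := hd
      have hstep : pvAStep (res, true, false) l = (res ++ ["model: sonnet", l], true, true) := by
        simp [pvAStep, hd']
      rw [List.foldl_cons, hstep, pvFold_ended]
      simp [pvSplitBeforeDelim, hd]
    · have hd' : (PySem.Str.strip l == "---") = false := by
        simpa [pvIsDelim] using hd
      by_cases hk : pvKeep l
      · have hk' : (!(PySem.Str.startswith (PySem.Str.strip l) "globs:"
            || PySem.Str.startswith (PySem.Str.strip l) "alwaysApply:")) = true := by
          simpa [pvKeep] using hk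
        have hstep : pvAStep (res, true, false) l = (res ++ [l], true, false) := by
          simp [pvAStep, hd']
          simpa using hk'
        rw [List.foldl_cons, hstep, ih]
        cases h : pvSplitBeforeDelim ls with
        | none => simp [pvSplitBeforeDelim, hd, h, hk]
        | some p =>
          obtain ⟨h1, t1⟩ := p
          simp [pvSplitBeforeDelim, hd, h, hk]
      · have hk' : (!(PySem.Str.startswith (PySem.Str.strip l) "globs:"
            || PySem.Str.startswith (PySem.Str.strip l) "alwaysApply:")) = false := by
          simpa [pvKeep] using hk
        have hstep : pvAStep (res, true, false) l = (res, true, false) := by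
          simp [pvAStep, hd']
          simpa using hk'
        rw [List.foldl_cons, hstep, ih]
        cases h : pvSplitBeforeDelim ls with
        | none => simp [pvSplitBeforeDelim, hd, h, hk]
        | some p =>
          obtain ⟨h1, t1⟩ := p
          simp [pvSplitBeforeDelim, hd, h, hk]

-- before the frontmatter, A copies lines until the opening delimiter
theorem pvFold_start (ls : List String) (res : List String) :
    (ls.foldl pvAStep (res, false, false)).1 =
      match pvSplitAfterDelim ls with
      | none => res ++ ls
      | some (head, body) => (body.foldl pvAStep (res ++ head, true, false)).1 := by
  induction ls generalizing res with
  | nil => simp [pvSplitAfterDelim]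
  | cons l ls ih =>
    by_cases hd : pvIsDelim l
    · have hd' : (PySem.Str.strip l == "---") = true := hd
      have hstep : pvAStep (res, false, false) l = (res ++ [l], true, false) := by
        simp [pvAStep, hd']
      rw [List.foldl_cons, hstep]
      simp [pvSplitAfterDelim, hd]
    · have hd' : (PySem.Str.strip l == "---") = false := by
        simpa [pvIsDelim] using hd
      have hstep : pvAStep (res, false, false) l = (res ++ [l], false, false) := by
        simp [pvAStep, hd']
      rw [List.foldl_cons, hstep, ih]
      cases h : pvSplitAfterDelim ls with
      | none => simp [pvSplitAfterDelim, hd, h]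
      | some p =>
        obtain ⟨h1, t1⟩ := p
        simp [pvSplitAfterDelim, hd, h]

-- ===== VERDICT (by name: the statement is the Claim_ definition above) =====
theorem convert_mdc_to_claude_format_spec : Claim_equal_convert_mdc_to_claude_format := by
  intro content _
  unfold Spec_convert_mdc_to_claude_format convert_mdc_to_claude_format convert_mdc_to_claude_format_alt
  rw [pvFold_start]
  cases h : pvSplitAfterDelim ((PySem.Str.split? content "\n").getD []) with
  | none => simp
  | some p =>
    obtain ⟨head, body⟩ := p
    dsimp only
    rw [pvFold_inside]
    cases h2 : pvSplitBeforeDelim body with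
    | none => simp
    | some q =>
      obtain ⟨interior, tail⟩ := q
      simp
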